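-- pv_equiv track=rewrite | github.com/SI201-UMich/fall25-project1-gveettil | main.py | most_frequent_crop_by_region
-- ===== SOURCE A (Python) =====
-- def most_frequent_crop_by_region(data):
--     """
--     Find the most frequent crop for each region
--     """
--     region_crops = {}
--     for row in data:
--         region = row['Region']
--         crop = row['Crop']
--         if region not in region_crops:
--             region_crops[region] = {}
--         if crop not in region_crops[region]:
--             region_crops[region][crop] = 0
--         region_crops[region][crop] += 1
--     result = {}
--     for region, crops in region_crops.items():
--         result[region] = max(crops.items(), key=lambda x: x[1])[0]
--     return result
-- ===== SOURCE B (Python) =====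
-- def most_frequent_crop_by_region(data):
--     counts = {}
--     for row in data:
--         key = (row['Region'], row['Crop'])
--         counts[key] = counts.get(key, 0) + 1
--     best_crop = {}
--     best_count = {}
--     for (region, crop), c in counts.items():
--         if region not in best_count or c > best_count[region]:
--             best_crop[region] = crop
--             best_count[region] = c
--     return best_crop
-- ===== Notes on version B (the rewrite author's own statement) =====
-- stated objective: alternative
-- what changed: Replaces the nested per-region dict-of-counters plus a per-region max() pass by a single flat (region,crop)->count dict and one strict-greater scan over its items maintaining best_crop/best_count, reproducing max's first-maximal tie-break via first-insertion order.
import Mathlib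
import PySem

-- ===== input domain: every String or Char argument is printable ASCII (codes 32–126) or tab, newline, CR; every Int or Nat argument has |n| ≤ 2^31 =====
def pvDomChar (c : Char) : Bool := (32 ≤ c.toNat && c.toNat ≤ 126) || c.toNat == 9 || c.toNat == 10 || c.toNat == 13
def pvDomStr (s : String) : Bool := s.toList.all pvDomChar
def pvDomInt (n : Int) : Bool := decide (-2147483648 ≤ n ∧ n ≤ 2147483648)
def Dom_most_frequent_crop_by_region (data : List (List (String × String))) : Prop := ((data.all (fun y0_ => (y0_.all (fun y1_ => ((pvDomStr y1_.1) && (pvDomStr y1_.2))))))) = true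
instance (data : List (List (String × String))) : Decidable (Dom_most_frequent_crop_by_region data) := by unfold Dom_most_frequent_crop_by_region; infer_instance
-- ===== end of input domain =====

-- B replaces A's nested per-region dict of counters (plus a per-region max() pass) by one flat
-- (region,crop)->count dict and a single strict-greater scan over its items; same cost, different shape.
-- (A mutates only its own local dicts; neither program mutates the argument.)

-- ===== PORT A =====
-- row['Region'] : first-match lookup in the row dict (KeyError → Pre_; '' never reached inside Pre_)
def pvRowGet (row : List (String × String)) (k : String) : String :=
  ((PySem.Dict.mk row).get? k).getD ""

-- Python's in-place 'region_crops[region][crop] += 1' is modeled functionally: the inner dict is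
-- read, updated, and re-inserted at its key (insert overwrites in place, as Python's reference mutation does).
def most_frequent_crop_by_region (data : List (List (String × String))) : List (String × String) :=
  let region_crops : PySem.Dict String (PySem.Dict String Int) :=
    data.foldl (fun rc row =>
      let region := pvRowGet row "Region"
      let crop := pvRowGet row "Crop"
      let rc := if rc.contains region then rc else rc.insert region PySem.Dict.empty
      let inner := rc.getD region PySem.Dict.empty
      let inner := if inner.contains crop then inner else inner.insert crop 0
      let inner := inner.insert crop (inner.getD crop 0 + 1)
      rc.insert region inner) PySem.Dict.empty
  let result : PySem.Dict String String :=
    region_crops.items.foldl (fun result p =>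
      -- max(crops.items(), key=lambda x: x[1])[0]; crops is never empty, the default is unreachable
      result.insert p.1 (((PySem.List.max? p.2.items (fun x => x.2)).getD ("", 0)).1)
    ) PySem.Dict.empty
  result.items

-- ===== PORT B =====
def most_frequent_crop_by_region_alt (data : List (List (String × String))) : List (String × String) :=
  let counts : PySem.Dict (String × String) Int :=
    data.foldl (fun d row =>
      let key := (pvRowGet row "Region", pvRowGet row "Crop")
      d.insert key (d.getD key 0 + 1)) PySem.Dict.empty
  let best : PySem.Dict String String × PySem.Dict String Int :=
    counts.items.foldl (fun best p =>
      if !(best.2.contains p.1.1) || best.2.getD p.1.1 0 < p.2 then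
        (best.1.insert p.1.1 p.1.2, best.2.insert p.1.1 p.2)
      else best) (PySem.Dict.empty, PySem.Dict.empty)
  best.1.items

-- ===== PRECONDITION & SPEC =====
-- Pre_ excludes exactly the rows missing a 'Region' or 'Crop' key, on which Python A raises KeyError.
def Pre_most_frequent_crop_by_region (data : List (List (String × String))) : Prop :=
  (data.all (fun row => row.any (fun p => p.1 == "Region") && row.any (fun p => p.1 == "Crop"))) = true
instance (data : List (List (String × String))) : Decidable (Pre_most_frequent_crop_by_region data) := by
  unfold Pre_most_frequent_crop_by_region; infer_instance

def pvWitness_most_frequent_crop_by_region : (List (List (String × String))) :=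
  [[("Region", "north"), ("Crop", "corn")], [("Region", "north"), ("Crop", "rice")], [("Region", "south"), ("Crop", "corn")]]

def Spec_most_frequent_crop_by_region (data : List (List (String × String))) (out : List (String × String)) : Prop := out = most_frequent_crop_by_region_alt data
instance (data : List (List (String × String))) (out : List (String × String)) : Decidable (Spec_most_frequent_crop_by_region data out) := by unfold Spec_most_frequent_crop_by_region; infer_instance

-- ===== CLAIM (what is proved, stated in full; the proofs are below) =====
def Claim_equal_most_frequent_crop_by_region : Prop := ∀ (data : List (List (String × String))), Dom_most_frequent_crop_by_region data → Pre_most_frequent_crop_by_region data → Spec_most_frequent_crop_by_region data (most_frequent_crop_by_region data)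

-- ===== LEMMAS AND PROOFS =====

-- (proof-side definitions) the (region, crop) key of a row; crop list of one region; region order,
-- per-region projection and strict first-maximum of a flat (region,crop)->count items list
def pvKey (row : List (String × String)) : String × String := (pvRowGet row "Region", pvRowGet row "Crop")
def pvCropsOf (ks : List (String × String)) (r : String) : List String :=
  (ks.filter (fun k => k.1 == r)).map (fun k => k.2)
def pvRegs (L : List ((String × String) × Int)) : List String := PySem.Set.ofList (L.map (fun q => q.1.1))
def pvProj (r : String) (L : List ((String × String) × Int)) : List (String × Int) :=
  (L.filter (fun q => q.1.1 == r)).map (fun q => (q.1.2, q.2))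
def pvBest (l : List (String × Int)) : String × Int := (PySem.List.max? l (fun x => x.2)).getD ("", 0)

theorem pvA_step (rc : PySem.Dict String (PySem.Dict String Int)) (region crop : String) :
    (let rc := if rc.contains region then rc else rc.insert region PySem.Dict.empty
     let inner := rc.getD region PySem.Dict.empty
     let inner := if inner.contains crop then inner else inner.insert crop 0
     let inner := inner.insert crop (inner.getD crop 0 + 1)
     rc.insert region inner) =
    rc.modify region PySem.Dict.empty (fun inner => inner.modify crop 0 (· + 1)) := by
  simp only [PySem.Dict.modify]
  by_cases h : rc.contains region = true
  · simp only [h, if_true]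
    by_cases h2 : (rc.getD region PySem.Dict.empty).contains crop = true
    · simp [h2]
    · simp only [Bool.not_eq_true] at h2
      simp [h2, PySem.Dict.insert_insert_self, PySem.Dict.getD_insert_self,
        PySem.Dict.getD_of_not_contains _ _ h2]
  · simp only [Bool.not_eq_true] at h
    simp only [h, Bool.false_eq_true, if_false,
      PySem.Dict.getD_insert_self, PySem.Dict.getD_of_not_contains _ _ h,
      PySem.Dict.contains_empty, PySem.Dict.insert_insert_self, PySem.Dict.getD_empty,
      PySem.Dict.getD_insert_self]

theorem pvInner_getD (l : List (String × String)) (d : PySem.Dict String (PySem.Dict String Int)) (r : String) :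
    (l.foldl (fun d k => d.modify k.1 PySem.Dict.empty (fun inner => inner.modify k.2 0 (· + 1))) d).getD r PySem.Dict.empty
      = (pvCropsOf l r).foldl (fun inner c => inner.modify c 0 (· + 1)) (d.getD r PySem.Dict.empty) := by
  induction l generalizing d with
  | nil => simp [pvCropsOf]
  | cons k t ih =>
    simp only [List.foldl_cons, ih, pvCropsOf, List.filter_cons]
    by_cases h : k.1 = r
    · simp [h]
    · have hb : (k.1 == r) = false := by simp [h]
      simp [hb, PySem.Dict.getD_modify, Ne.symm h]

theorem pvOfList_append {α : Type} [BEq α] (l : List α) (a : α) :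
    PySem.Set.ofList (l ++ [a]) = PySem.Set.add (PySem.Set.ofList l) a := by
  simp [PySem.Set.ofList_eq_foldl, List.foldl_append]

theorem pvAdd_contains {α : Type} [BEq α] [LawfulBEq α] (s : PySem.Set α) (a : α)
    (h : a ∈ s) : PySem.Set.add s a = s := by
  simp [PySem.Set.add, PySem.Set.contains, h]

theorem pvAdd_not_contains {α : Type} [BEq α] [LawfulBEq α] (s : PySem.Set α) (a : α)
    (h : ¬ a ∈ s) : PySem.Set.add s a = s ++ [a] := by
  simp [PySem.Set.add, PySem.Set.contains, h]

theorem pvOfList_map_fst {α β : Type} [BEq α] [LawfulBEq α] [BEq β] [LawfulBEq β]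
    (f : α → β) (l : List α) :
    PySem.Set.ofList ((PySem.Set.ofList l).map f) = PySem.Set.ofList (l.map f) := by
  induction l using List.reverseRecOn with
  | nil => rfl
  | append_singleton t a ih =>
    rw [pvOfList_append, List.map_append, List.map_singleton, pvOfList_append]
    by_cases h : a ∈ PySem.Set.ofList t
    · rw [pvAdd_contains _ _ h, ih, pvAdd_contains]
      rw [PySem.Set.mem_ofList] at h ⊢
      exact List.mem_map_of_mem h
    · rw [pvAdd_not_contains _ _ h, List.map_append, List.map_singleton, pvOfList_append, ih]

theorem pvOfList_filter {α : Type} [BEq α] [LawfulBEq α] (p : α → Bool) (l : List α) :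
    (PySem.Set.ofList l).filter p = PySem.Set.ofList (l.filter p) := by
  induction l using List.reverseRecOn with
  | nil => rfl
  | append_singleton t a ih =>
    rw [pvOfList_append, List.filter_append]
    by_cases h : a ∈ PySem.Set.ofList t
    · rw [pvAdd_contains _ _ h, ih]
      by_cases hp : p a = true
      · simp only [List.filter_singleton, hp, cond_true]
        rw [pvOfList_append, pvAdd_contains]
        rw [PySem.Set.mem_ofList] at h ⊢
        exact List.mem_filter.2 ⟨h, hp⟩
      · simp [hp]
    · rw [pvAdd_not_contains _ _ h, List.filter_append, ih]
      by_cases hp : p a = true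
      · simp only [List.filter_singleton, hp, cond_true]
        rw [pvOfList_append, pvAdd_not_contains]
        rw [PySem.Set.mem_ofList] at h ⊢
        intro hmem
        exact h (List.mem_of_mem_filter hmem)
      · simp [hp]

theorem pvOfList_map_inj {α β : Type} [BEq α] [LawfulBEq α] [BEq β] [LawfulBEq β]
    (f : α → β) (hf : Function.Injective f) (l : List α) :
    PySem.Set.ofList (l.map f) = (PySem.Set.ofList l).map f := by
  induction l using List.reverseRecOn with
  | nil => rfl
  | append_singleton t a ih =>
    rw [List.map_append, List.map_singleton, pvOfList_append, ih, pvOfList_append]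
    by_cases h : a ∈ PySem.Set.ofList t
    · rw [pvAdd_contains _ _ h, pvAdd_contains]
      exact List.mem_map_of_mem h
    · rw [pvAdd_not_contains _ _ h, pvAdd_not_contains, List.map_append, List.map_singleton]
      intro hmem
      obtain ⟨x, hx, hfx⟩ := List.mem_map.1 hmem
      exact h (hf hfx ▸ hx)

theorem pvCount_key (ks : List (String × String)) (r c : String) :
    ks.count (r, c) = (pvCropsOf ks r).count c := by
  simp only [pvCropsOf, List.count_eq_countP, List.countP_map, List.countP_filter]
  apply List.countP_congr
  intro k _
  cases k with
  | mk a b => simp [Function.comp, Prod.ext_iff, and_comm]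

theorem pvProj_counter (ks : List (String × String)) (r : String) :
    pvProj r ((PySem.Set.ofList ks).map (fun k => (k, (ks.count k : Int))))
      = (PySem.Dict.counter (pvCropsOf ks r)).items := by
  rw [PySem.Dict.items_counter]
  simp only [pvProj, List.filter_map]
  have h1 : (List.filter ((fun q => q.1.1 == r) ∘ (fun k => (k, (ks.count k : Int)))) (PySem.Set.ofList ks))
      = (PySem.Set.ofList ks).filter (fun k => k.1 == r) := by
    apply List.filter_congr; intro x _; rfl
  rw [h1, pvOfList_filter]
  have h2 : ks.filter (fun k => k.1 == r) = ((pvCropsOf ks r).map (fun c => (r, c))) := by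
    rw [pvCropsOf, List.map_map]
    apply (List.map_id _).symm.trans
    apply List.map_congr_left
    intro x hx
    have hr := (List.mem_filter.1 hx).2
    simp at hr
    simp [Function.comp, ← hr]
  rw [h2, pvOfList_map_inj _ (fun a b h => by simpa using h), List.map_map, List.map_map]
  apply List.map_congr_left
  intro c hc
  simp only [Function.comp]
  congr 1
  rw [pvCount_key]

theorem pvRegs_append_one (P : List ((String × String) × Int)) (x : (String × String) × Int) :
    pvRegs (P ++ [x]) = PySem.Set.add (pvRegs P) x.1.1 := by
  simp only [pvRegs, List.map_append, List.map_singleton, pvOfList_append]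

theorem pvProj_append_one (r : String) (P : List ((String × String) × Int)) (x : (String × String) × Int) :
    pvProj r (P ++ [x]) = pvProj r P ++ (if x.1.1 == r then [(x.1.2, x.2)] else []) := by
  simp only [pvProj, List.filter_append, List.map_append]
  congr 1
  by_cases h : x.1.1 = r <;> simp [h]

theorem pvMem_regs (r : String) (P : List ((String × String) × Int)) :
    r ∈ pvRegs P ↔ ∃ q ∈ P, q.1.1 = r := by
  simp [pvRegs, PySem.Set.mem_ofList, List.mem_map, eq_comm]

theorem pvProj_eq_nil (r : String) (P : List ((String × String) × Int)) (h : ¬ r ∈ pvRegs P) :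
    pvProj r P = [] := by
  simp only [pvProj, List.map_eq_nil_iff, List.filter_eq_nil_iff]
  intro q hq
  simp only [beq_iff_eq]
  exact fun hr => h ((pvMem_regs r P).2 ⟨q, hq, hr⟩)

theorem pvProj_ne_nil (r : String) (P : List ((String × String) × Int)) (h : r ∈ pvRegs P) :
    pvProj r P ≠ [] := by
  obtain ⟨q, hq, hr⟩ := (pvMem_regs r P).1 h
  simp only [pvProj, ne_eq, List.map_eq_nil_iff, List.filter_eq_nil_iff]
  push Not
  exact ⟨q, hq, by simp [hr]⟩

theorem pvMax?_append_one (l : List (String × Int)) (p : String × Int) :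
    PySem.List.max? (l ++ [p]) (fun x => x.2)
      = some (match PySem.List.max? l (fun x => x.2) with
              | none => p
              | some m => if m.2 < p.2 then p else m) := by
  cases hc : PySem.List.max? l (fun x : String × Int => x.2) with
  | none =>
    simp only [PySem.List.max?] at hc
    simp [PySem.List.max?, List.foldl_append, hc]
  | some m =>
    simp only [PySem.List.max?] at hc
    by_cases h : m.2 < p.2 <;>
      simp [PySem.List.max?, List.foldl_append, hc, h]

theorem pvB_fold (L : List ((String × String) × Int)) :
    ∀ (P : List ((String × String) × Int)) (bc : PySem.Dict String String) (bn : PySem.Dict String Int),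
    bc.items = (pvRegs P).map (fun r => (r, (pvBest (pvProj r P)).1)) →
    bn.items = (pvRegs P).map (fun r => (r, (pvBest (pvProj r P)).2)) →
    (L.foldl (fun best p =>
        if !(best.2.contains p.1.1) || best.2.getD p.1.1 0 < p.2 then
          (best.1.insert p.1.1 p.1.2, best.2.insert p.1.1 p.2)
        else best) (bc, bn)).1.items
      = (pvRegs (P ++ L)).map (fun r => (r, (pvBest (pvProj r (P ++ L))).1)) := by
  induction L with
  | nil => intro P bc bn hbc hbn; simpa using hbc
  | cons x t ih =>
    intro P bc bn hbc hbn
    have hbckeys : bc.keys = pvRegs P := by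
      simp [PySem.Dict.keys, hbc, List.map_map, Function.comp_def]
    have hbnkeys : bn.keys = pvRegs P := by
      simp [PySem.Dict.keys, hbn, List.map_map, Function.comp_def]
    have hnodup : (pvRegs P).Nodup := PySem.Set.nodup_ofList _
    have hPx : P ++ x :: t = (P ++ [x]) ++ t := by simp
    rw [hPx, List.foldl_cons]
    by_cases hmem : x.1.1 ∈ pvRegs P
    · -- region already seen
      have hcont : bn.contains x.1.1 = true := by
        rw [PySem.Dict.contains_iff_mem_keys, hbnkeys]; exact hmem
      have hbccont : bc.contains x.1.1 = true := by
        rw [PySem.Dict.contains_iff_mem_keys, hbckeys]; exact hmem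
      obtain ⟨m, hm⟩ : ∃ m, PySem.List.max? (pvProj x.1.1 P) (fun y => y.2) = some m := by
        cases hc : PySem.List.max? (pvProj x.1.1 P) (fun y => y.2) with
        | none => exact absurd ((PySem.List.max?_eq_none_iff _ _).1 hc) (pvProj_ne_nil _ _ hmem)
        | some m => exact ⟨m, rfl⟩
      have hbest : pvBest (pvProj x.1.1 P) = m := by simp [pvBest, hm]
      have hgetD : bn.getD x.1.1 0 = m.2 := by
        have hmemit : (x.1.1, (pvBest (pvProj x.1.1 P)).2) ∈ bn.items := by
          rw [hbn]; exact List.mem_map_of_mem hmem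
        rw [hbest] at hmemit
        exact PySem.Dict.getD_of_mem_items _ hmemit (by rw [hbnkeys]; exact hnodup) 0
      have hregs' : pvRegs (P ++ [x]) = pvRegs P := by
        rw [pvRegs_append_one, pvAdd_contains _ _ hmem]
      have hproj_ne (r : String) (hr : r ∈ pvRegs P) (hne : r ≠ x.1.1) :
          pvProj r (P ++ [x]) = pvProj r P := by
        rw [pvProj_append_one]
        have hb : (x.1.1 == r) = false := by simp [Ne.symm hne]
        simp [hb]
      by_cases hlt : bn.getD x.1.1 0 < x.2
      · -- strictly better: overwrite in place
        rw [if_pos (by simp [hlt])]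
        refine ih (P ++ [x]) _ _ ?_ ?_
        · rw [PySem.Dict.items_insert_of_contains _ _ hbccont, hbc, List.map_map, hregs']
          apply List.map_congr_left
          intro r hr
          by_cases hre : r = x.1.1
          · subst hre
            have hb : pvBest (pvProj x.1.1 (P ++ [x])) = (x.1.2, x.2) := by
              rw [pvProj_append_one]
              simp only [beq_self_eq_true, if_true]
              rw [pvBest, pvMax?_append_one, hm]
              rw [hgetD] at hlt
              simp [hlt]
            simp [hb]
          · have hb : ((r : String) == x.1.1) = false := by simp [hre]
            simp [hproj_ne r hr hre, hre]
        · rw [PySem.Dict.items_insert_of_contains _ _ hcont, hbn, List.map_map, hregs']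
          apply List.map_congr_left
          intro r hr
          by_cases hre : r = x.1.1
          · subst hre
            have hb : pvBest (pvProj x.1.1 (P ++ [x])) = (x.1.2, x.2) := by
              rw [pvProj_append_one]
              simp only [beq_self_eq_true, if_true]
              rw [pvBest, pvMax?_append_one, hm]
              rw [hgetD] at hlt
              simp [hlt]
            simp [hb]
          · have hb : ((r : String) == x.1.1) = false := by simp [hre]
            simp [hproj_ne r hr hre, hre]
      · -- not better: state unchanged
        rw [if_neg (by simp [hlt, hcont])]
        refine ih (P ++ [x]) bc bn ?_ ?_
        · rw [hbc, hregs']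
          apply List.map_congr_left
          intro r hr
          by_cases hre : r = x.1.1
          · subst hre
            have hb : pvBest (pvProj x.1.1 (P ++ [x])) = m := by
              rw [pvProj_append_one]
              simp only [beq_self_eq_true, if_true]
              rw [pvBest, pvMax?_append_one, hm]
              rw [hgetD] at hlt
              simp [hlt]
            rw [hb, hbest]
          · rw [hproj_ne r hr hre]
        · rw [hbn, hregs']
          apply List.map_congr_left
          intro r hr
          by_cases hre : r = x.1.1
          · subst hre
            have hb : pvBest (pvProj x.1.1 (P ++ [x])) = m := by
              rw [pvProj_append_one]
              simp only [beq_self_eq_true, if_true]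
              rw [pvBest, pvMax?_append_one, hm]
              rw [hgetD] at hlt
              simp [hlt]
            rw [hb, hbest]
          · rw [hproj_ne r hr hre]
    · -- new region: append at the end
      have hcont : bn.contains x.1.1 = false := by
        rw [← Bool.not_eq_true, PySem.Dict.contains_iff_mem_keys, hbnkeys]; exact hmem
      have hbccont : bc.contains x.1.1 = false := by
        rw [← Bool.not_eq_true, PySem.Dict.contains_iff_mem_keys, hbckeys]; exact hmem
      rw [if_pos (by simp [hcont])]
      have hregs' : pvRegs (P ++ [x]) = pvRegs P ++ [x.1.1] := by
        rw [pvRegs_append_one, pvAdd_not_contains _ _ hmem]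
      have hprojx : pvProj x.1.1 (P ++ [x]) = [(x.1.2, x.2)] := by
        rw [pvProj_append_one, pvProj_eq_nil _ _ hmem]
        simp
      refine ih (P ++ [x]) _ _ ?_ ?_
      · rw [PySem.Dict.items_insert_of_not_contains _ _ hbccont, hbc, hregs',
          List.map_append, List.map_singleton]
        congr 1
        · apply List.map_congr_left
          intro r hr
          have hre : r ≠ x.1.1 := fun h => hmem (h ▸ hr)
          rw [pvProj_append_one]
          have hb : (x.1.1 == r) = false := by simp [Ne.symm hre]
          simp [hb]
        · rw [hprojx]
          simp [pvBest, PySem.List.max?]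
      · rw [PySem.Dict.items_insert_of_not_contains _ _ hcont, hbn, hregs',
          List.map_append, List.map_singleton]
        congr 1
        · apply List.map_congr_left
          intro r hr
          have hre : r ≠ x.1.1 := fun h => hmem (h ▸ hr)
          rw [pvProj_append_one]
          have hb : (x.1.1 == r) = false := by simp [Ne.symm hre]
          simp [hb]
        · rw [hprojx]
          simp [pvBest, PySem.List.max?]

theorem pvMain (data : List (List (String × String))) :
    most_frequent_crop_by_region data = most_frequent_crop_by_region_alt data := by
  unfold most_frequent_crop_by_region most_frequent_crop_by_region_alt
  -- normalize A's counting loop to a modify-fold over the key list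
  have hA1 : data.foldl (fun rc row =>
      let region := pvRowGet row "Region"
      let crop := pvRowGet row "Crop"
      let rc' := if rc.contains region then rc else rc.insert region PySem.Dict.empty
      let inner := rc'.getD region PySem.Dict.empty
      let inner' := if inner.contains crop then inner else inner.insert crop (0 : Int)
      let inner'' := inner'.insert crop (inner'.getD crop 0 + 1)
      rc'.insert region inner'') PySem.Dict.empty
      = (data.map pvKey).foldl (fun d k => d.modify k.1 PySem.Dict.empty
          (fun inner => inner.modify k.2 0 (· + 1))) PySem.Dict.empty := by
    rw [List.foldl_map]
    apply PySem.List.foldl_congr_mem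
    intro rc row _
    exact pvA_step rc _ _
  -- normalize B's counting loop to the Counter of the key list
  have hB1 : data.foldl (fun d row =>
      let key := (pvRowGet row "Region", pvRowGet row "Crop")
      d.insert key (d.getD key 0 + 1)) PySem.Dict.empty
      = PySem.Dict.counter (data.map pvKey) := by
    rw [← PySem.Dict.foldl_insert_getD_add_one_eq_counter, List.foldl_map]
    rfl
  simp only [hA1, hB1]
  set ks := data.map pvKey with hks
  set rc := ks.foldl (fun d k => d.modify k.1 PySem.Dict.empty
      (fun inner => inner.modify k.2 0 (· + 1)))
      (PySem.Dict.empty : PySem.Dict String (PySem.Dict String Int)) with hrc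
  have hkeys : rc.keys = PySem.Set.ofList (ks.map (fun k => k.1)) := by
    rw [hrc, PySem.Dict.keys_foldl_modify_key ks (fun k => k.1) PySem.Dict.empty
      (fun d x => fun inner => inner.modify x.2 0 (· + 1))]
    rfl
  have hnodup : rc.keys.Nodup := by
    rw [hkeys]; exact PySem.Set.nodup_ofList _
  have hgetD : ∀ r, rc.getD r PySem.Dict.empty = PySem.Dict.counter (pvCropsOf ks r) := by
    intro r
    rw [hrc, pvInner_getD, PySem.Dict.getD_empty, ← PySem.Dict.counter_eq_foldl]
  have hitems : rc.items = (PySem.Set.ofList (ks.map (fun k => k.1))).map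
      (fun r => (r, PySem.Dict.counter (pvCropsOf ks r))) := by
    rw [PySem.Dict.items_eq_map_keys rc hnodup PySem.Dict.empty, hkeys]
    exact List.map_congr_left fun r _ => by rw [hgetD]
  -- A's result items
  have hares : (rc.items.foldl (fun result p =>
      result.insert p.1 (((PySem.List.max? p.2.items (fun x => x.2)).getD ("", 0)).1))
      PySem.Dict.empty).items
      = rc.items.map (fun p => (p.1, ((PySem.List.max? p.2.items (fun x => x.2)).getD ("", 0)).1)) := by
    rw [PySem.Dict.items_foldl_insert_fresh rc.items (fun p => p.1)
      (fun p => ((PySem.List.max? p.2.items (fun x => x.2)).getD ("", 0)).1) PySem.Dict.empty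
      (fun a _ => PySem.Dict.contains_empty _) (by simpa [PySem.Dict.keys] using hnodup)]
    rfl
  rw [hares, hitems, List.map_map]
  -- B's result items via the scan invariant
  rw [PySem.Dict.items_counter]
  have hbres := pvB_fold ((PySem.Set.ofList ks).map (fun k => (k, (ks.count k : Int)))) [] PySem.Dict.empty PySem.Dict.empty (by rfl) (by rfl)
  rw [List.nil_append] at hbres
  rw [hbres]
  -- bridge: same region order, same per-region items
  have hregsL : pvRegs ((PySem.Set.ofList ks).map (fun k => (k, (ks.count k : Int))))
      = PySem.Set.ofList (ks.map (fun k => k.1)) := by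
    rw [pvRegs, List.map_map]
    exact pvOfList_map_fst (fun k => k.1) ks
  rw [hregsL]
  apply List.map_congr_left
  intro r _
  rw [pvProj_counter]
  rfl

-- ===== VERDICT (by name: the statement is the Claim_ definition above) =====
theorem most_frequent_crop_by_region_spec : Claim_equal_most_frequent_crop_by_region := by
  intro data _ _
  unfold Spec_most_frequent_crop_by_region
  exact pvMain data
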